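-- pv_equiv track=rewrite | github.com/xuezihan123456/handwrite | src/handwrite/exporter.py | _sanitize_prefix
-- ===== SOURCE A (Python) =====
-- _INVALID_PREFIX_CHARS = '<>:"|?*'
--
-- def _sanitize_prefix(prefix: str) -> str:
--     normalized = prefix.replace("\\", "/")
--     parts = [part for part in normalized.split("/") if part not in {"", ".", ".."}]
--     cleaned_parts = [
--         "".join("_" if char in _INVALID_PREFIX_CHARS or ord(char) < 32 else char for char in part)
--         for part in parts
--     ]
--     safe_prefix = "_".join(part for part in cleaned_parts if part)
--     return safe_prefix or "page"
-- ===== SOURCE B (Python) =====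
-- _INVALID_PREFIX_CHARS = '<>:"|?*'
--
-- def _sanitize_prefix(prefix: str) -> str:
--     # single left-to-right scan; buffers the raw segment (for the ''/'.'/'..' test)
--     # and its cleaned copy at the same time; no normalize/split/rejoin passes
--     segments = []
--     raw = ""
--     clean = ""
--     for ch in prefix:
--         if ch == "/" or ch == "\\":
--             if raw not in ("", ".", ".."):
--                 segments.append(clean)
--             raw = ""
--             clean = ""
--         else:
--             raw += ch
--             clean += "_" if ch in _INVALID_PREFIX_CHARS or ord(ch) < 32 else ch
--     if raw not in ("", ".", ".."):
--         segments.append(clean)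
--     return "_".join(segments) or "page"
-- ===== Notes on version B (the rewrite author's own statement) =====
-- stated objective: alternative
-- what changed: Replaced A's four-pass pipeline (replace backslashes, split on '/', filter, per-part clean, join) by a single left-to-right scan that buffers each segment's raw and cleaned form simultaneously and flushes at either separator.
import Mathlib
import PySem

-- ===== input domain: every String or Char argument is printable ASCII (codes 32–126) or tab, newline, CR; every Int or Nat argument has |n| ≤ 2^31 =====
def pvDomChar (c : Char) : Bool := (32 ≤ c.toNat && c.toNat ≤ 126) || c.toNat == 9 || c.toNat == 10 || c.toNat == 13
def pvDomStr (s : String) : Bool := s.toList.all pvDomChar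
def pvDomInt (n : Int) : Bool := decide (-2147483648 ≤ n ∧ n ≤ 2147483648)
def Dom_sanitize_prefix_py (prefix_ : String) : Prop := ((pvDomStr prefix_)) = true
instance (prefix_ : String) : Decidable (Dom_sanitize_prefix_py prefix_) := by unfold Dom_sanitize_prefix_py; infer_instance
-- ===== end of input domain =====

-- B replaces A's replace/split/filter/clean/join pipeline by one left-to-right scan (alternative decomposition, same cost).

-- ===== PORT A =====
-- port of A: normalize backslashes, split on '/', filter {'','.','..'}, clean each part, join with '_'
def sanitize_prefix_py (prefix_ : String) : String :=
  let normalized := PySem.Chars.replace prefix_.toList ['\\'] ['/']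
  let parts := (PySem.Chars.splitOn normalized ['/']).filter
    (fun part => !(part == [] || part == ['.'] || part == ['.', '.']))
  let cleaned_parts := parts.map (fun part => part.map
    (fun ch => if PySem.Chars.isIn [ch] "<>:\"|?*".toList || ch.toNat < 32 then '_' else ch))
  let safe_prefix := PySem.Chars.join ['_'] (cleaned_parts.filter (fun part => !(part == [])))
  if safe_prefix == [] then "page" else String.mk safe_prefix

-- ===== PORT B =====
-- B's per-character cleaner ('_' for invalid or control characters)
def pvCleanChar (ch : Char) : Char :=
  if PySem.Chars.isIn [ch] "<>:\"|?*".toList || ch.toNat < 32 then '_' else ch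

-- the scan loop of Source B: state = (raw buffer, clean buffer); flush on '/' or '\' and at the end
def pvScanB : List Char → List Char → List Char → List (List Char)
  | [], raw, clean =>
      if raw = [] ∨ raw = ['.'] ∨ raw = ['.', '.'] then [] else [clean]
  | c :: t, raw, clean =>
      if c = '/' ∨ c = '\\' then
        (if raw = [] ∨ raw = ['.'] ∨ raw = ['.', '.'] then pvScanB t [] []
         else clean :: pvScanB t [] [])
      else pvScanB t (raw ++ [c]) (clean ++ [pvCleanChar c])

def sanitize_prefix_py_alt (prefix_ : String) : String :=
  let segments := pvScanB prefix_.toList [] []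
  let joined := PySem.Chars.join ['_'] segments
  if joined = [] then "page" else String.mk joined

-- ===== PRECONDITION & SPEC =====
def Spec_sanitize_prefix_py (prefix_ : String) (out : String) : Prop := out = sanitize_prefix_py_alt prefix_
instance (prefix_ : String) (out : String) : Decidable (Spec_sanitize_prefix_py prefix_ out) := by unfold Spec_sanitize_prefix_py; infer_instance

-- ===== CLAIM (what is proved, stated in full; the proofs are below) =====
def Claim_equal_sanitize_prefix_py : Prop := ∀ (prefix_ : String), Dom_sanitize_prefix_py prefix_ → Spec_sanitize_prefix_py prefix_ (sanitize_prefix_py prefix_)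

-- ===== LEMMAS AND PROOFS =====

-- reference split on a single separator character
def pvSplitC (c : Char) : List Char → List (List Char)
  | [] => [[]]
  | a :: t =>
      if a = c then [] :: pvSplitC c t
      else
        match pvSplitC c t with
        | [] => [[a]]
        | h :: r => (a :: h) :: r

-- prepend a buffer onto the head segment
def pvConsHead (p : List Char) : List (List Char) → List (List Char)
  | [] => [p]
  | h :: r => (p ++ h) :: r

lemma pvSplitC_ne_nil (c : Char) (l : List Char) : pvSplitC c l ≠ [] := by
  cases l with
  | nil => simp [pvSplitC]
  | cons a t =>
      simp only [pvSplitC]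
      split
      · simp
      · split <;> simp

lemma replace_go_single (c d : Char) :
    ∀ (fuel : Nat) (l acc : List Char), l.length ≤ fuel →
      PySem.Chars.replace.go [c] [d] fuel l acc
        = acc.reverse ++ l.map (fun x => if x = c then d else x) := by
  intro fuel
  induction fuel with
  | zero =>
      intro l acc h
      have : l = [] := List.length_eq_zero_iff.mp (Nat.le_zero.mp h)
      subst this; simp [PySem.Chars.replace.go]
  | succ n ih =>
      intro l acc h
      cases l with
      | nil => simp [PySem.Chars.replace.go]
      | cons a t =>
          simp only [PySem.Chars.replace.go, List.isPrefixOf]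
          by_cases hac : a = c
          · subst hac
            simp only [BEq.rfl, Bool.true_and, if_pos]
            rw [ih _ _ (by simpa using Nat.le_of_succ_le_succ h)]
            simp
          · have hb : (c == a && true) = false := by
              simp only [Bool.and_true, beq_eq_false_iff_ne, ne_eq]
              exact fun hh => hac hh.symm
            rw [if_neg (by rw [hb]; exact Bool.false_ne_true)]
            rw [ih _ _ (by simpa using Nat.le_of_succ_le_succ h)]
            simp [hac]

lemma splitOn_go_single (c : Char) :
    ∀ (fuel : Nat) (l cur : List Char) (acc : List (List Char)), l.length ≤ fuel →
      PySem.Chars.splitOn.go [c] fuel l cur acc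
        = acc.reverse ++ pvConsHead cur.reverse (pvSplitC c l) := by
  intro fuel
  induction fuel with
  | zero =>
      intro l cur acc h
      have : l = [] := List.length_eq_zero_iff.mp (Nat.le_zero.mp h)
      subst this; simp [PySem.Chars.splitOn.go, pvSplitC, pvConsHead]
  | succ n ih =>
      intro l cur acc h
      cases l with
      | nil => simp [PySem.Chars.splitOn.go, pvSplitC, pvConsHead]
      | cons a t =>
          simp only [PySem.Chars.splitOn.go, List.isPrefixOf]
          by_cases hac : a = c
          · subst hac
            simp only [BEq.rfl, Bool.true_and, if_pos]
            rw [ih _ _ _ (by simpa using Nat.le_of_succ_le_succ h)]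
            obtain ⟨h0, r, hr⟩ : ∃ h0 r, pvSplitC a t = h0 :: r := by
              cases hsp : pvSplitC a t with
              | nil => exact absurd hsp (pvSplitC_ne_nil a t)
              | cons h0 r => exact ⟨h0, r, rfl⟩
            simp [pvSplitC, pvConsHead, hr]
          · have hb : (c == a && true) = false := by
              simp only [Bool.and_true, beq_eq_false_iff_ne, ne_eq]
              exact fun hh => hac hh.symm
            rw [if_neg (by rw [hb]; exact Bool.false_ne_true)]
            rw [ih _ _ _ (by simpa using Nat.le_of_succ_le_succ h)]
            obtain ⟨h0, r, hr⟩ : ∃ h0 r, pvSplitC c t = h0 :: r := by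
              cases hsp : pvSplitC c t with
              | nil => exact absurd hsp (pvSplitC_ne_nil c t)
              | cons h0 r => exact ⟨h0, r, rfl⟩
            simp [pvSplitC, pvConsHead, hr, hac]

-- split of the backslash-normalized string = two-separator split of the original
def pvSplit2 : List Char → List (List Char)
  | [] => [[]]
  | a :: t =>
      if a = '/' ∨ a = '\\' then [] :: pvSplit2 t
      else
        match pvSplit2 t with
        | [] => [[a]]
        | h :: r => (a :: h) :: r

lemma pvSplit2_ne_nil (l : List Char) : pvSplit2 l ≠ [] := by
  cases l with
  | nil => simp [pvSplit2]
  | cons a t =>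
      simp only [pvSplit2]
      split
      · simp
      · split <;> simp

lemma splitC_map_norm (l : List Char) :
    pvSplitC '/' (l.map (fun x => if x = '\\' then '/' else x)) = pvSplit2 l := by
  induction l with
  | nil => rfl
  | cons a t ih =>
      by_cases h1 : a = '\\'
      · subst h1; simp [pvSplitC, pvSplit2, ih]
      · by_cases h2 : a = '/'
        · subst h2; simp [pvSplitC, pvSplit2, ih]
        · simp only [List.map, if_neg h1]
          simp only [pvSplitC, if_neg h2, pvSplit2, ih]
          rw [if_neg (by tauto)]

-- A's post-split processing: drop bad raw parts, clean the rest
abbrev pvBad (p : List Char) : Prop := p = [] ∨ p = ['.'] ∨ p = ['.', '.']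

def pvProcA (parts : List (List Char)) : List (List Char) :=
  (parts.filter (fun p => !(decide (pvBad p)))).map (fun p => p.map pvCleanChar)

lemma pvProcA_cons (p : List Char) (s : List (List Char)) :
    pvProcA (p :: s) = if pvBad p then pvProcA s else p.map pvCleanChar :: pvProcA s := by
  unfold pvProcA
  rw [List.filter_cons]
  by_cases h : pvBad p
  · simp [h]
  · simp [h]

lemma pvScanB_spec (l : List Char) :
    ∀ raw, pvScanB l raw (raw.map pvCleanChar) = pvProcA (pvConsHead raw (pvSplit2 l)) := by
  induction l with
  | nil =>
      intro raw
      have h1 : pvConsHead raw (pvSplit2 []) = [raw] := by simp [pvSplit2, pvConsHead]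
      rw [h1, pvProcA_cons]
      by_cases h : raw = [] ∨ raw = ['.'] ∨ raw = ['.', '.']
      · simp only [pvScanB, if_pos h]
        rfl
      · simp only [pvScanB, if_neg h]
        rfl
  | cons a t ih =>
      intro raw
      obtain ⟨h0, r, hr⟩ : ∃ h0 r, pvSplit2 t = h0 :: r := by
        cases hsp : pvSplit2 t with
        | nil => exact absurd hsp (pvSplit2_ne_nil t)
        | cons h0 r => exact ⟨h0, r, rfl⟩
      by_cases hsep : a = '/' ∨ a = '\\'
      · have hch : pvConsHead raw (pvSplit2 (a :: t)) = raw :: pvSplit2 t := by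
          simp [pvSplit2, if_pos hsep, pvConsHead]
        rw [hch, pvProcA_cons]
        have ihe := ih []
        simp only [List.map_nil] at ihe
        have hch2 : pvConsHead [] (pvSplit2 t) = pvSplit2 t := by
          rw [hr]; simp [pvConsHead]
        rw [hch2] at ihe
        simp only [pvScanB, if_pos hsep, ihe]
      · have ihe := ih (raw ++ [a])
        simp only [List.map_append, List.map_cons, List.map_nil] at ihe
        have hch : pvConsHead raw (pvSplit2 (a :: t)) = pvConsHead (raw ++ [a]) (pvSplit2 t) := by
          rw [hr]
          simp [pvSplit2, if_neg hsep, hr, pvConsHead]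
        rw [hch, ← ihe]
        simp only [pvScanB, if_neg hsep]

lemma pvProcA_ne_nil : ∀ (parts : List (List Char)), ∀ p ∈ pvProcA parts, p ≠ [] := by
  intro parts p hp
  simp only [pvProcA, List.mem_map, List.mem_filter] at hp
  obtain ⟨q, ⟨hq, hbad⟩, rfl⟩ := hp
  simp only [Bool.not_eq_true', decide_eq_false_iff_not, pvBad] at hbad
  intro hnil
  exact hbad (Or.inl (by simpa using congrArg List.length hnil))

-- ===== VERDICT (by name: the statement is the Claim_ definition above) =====
theorem sanitize_prefix_py_spec : Claim_equal_sanitize_prefix_py := by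
  intro prefix_ _
  unfold Spec_sanitize_prefix_py sanitize_prefix_py sanitize_prefix_py_alt
  have hrep : PySem.Chars.replace prefix_.toList ['\\'] ['/']
      = prefix_.toList.map (fun x => if x = '\\' then '/' else x) := by
    rw [PySem.Chars.replace]
    simp only [List.isEmpty_cons, if_neg Bool.false_ne_true]
    exact replace_go_single '\\' '/' _ _ _ (le_refl _)
  have hsplit : PySem.Chars.splitOn (prefix_.toList.map (fun x => if x = '\\' then '/' else x)) ['/']
      = pvSplit2 prefix_.toList := by
    rw [PySem.Chars.splitOn, splitOn_go_single '/' _ _ _ _ (Nat.le_succ _)]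
    simp only [List.reverse_nil, List.nil_append]
    rw [splitC_map_norm]
    obtain ⟨h0, r, hr⟩ : ∃ h0 r, pvSplit2 prefix_.toList = h0 :: r := by
      cases hsp : pvSplit2 prefix_.toList with
      | nil => exact absurd hsp (pvSplit2_ne_nil _)
      | cons h0 r => exact ⟨h0, r, rfl⟩
    simp [pvConsHead, hr]
  have hscan : pvScanB prefix_.toList [] [] = pvProcA (pvSplit2 prefix_.toList) := by
    have := pvScanB_spec prefix_.toList []
    simp only [List.map_nil] at this
    rw [this]
    obtain ⟨h0, r, hr⟩ : ∃ h0 r, pvSplit2 prefix_.toList = h0 :: r := by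
      cases hsp : pvSplit2 prefix_.toList with
      | nil => exact absurd hsp (pvSplit2_ne_nil _)
      | cons h0 r => exact ⟨h0, r, rfl⟩
    simp [pvConsHead, hr]
  have hfilter :
      ((pvSplit2 prefix_.toList).filter
          (fun part => !(part == [] || part == ['.'] || part == ['.', '.']))).map
        (fun part => part.map
          (fun ch => if PySem.Chars.isIn [ch] "<>:\"|?*".toList || ch.toNat < 32 then '_' else ch))
        = pvProcA (pvSplit2 prefix_.toList) := by
    unfold pvProcA pvCleanChar
    congr 1
    apply List.filter_congr
    intro p _
    cases p <;> simp [pvBad, beq_eq_decide]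
  have hnofilter :
      (pvProcA (pvSplit2 prefix_.toList)).filter (fun part => !(part == []))
        = pvProcA (pvSplit2 prefix_.toList) := by
    apply List.filter_eq_self.mpr
    intro p hp
    simpa using pvProcA_ne_nil _ p hp
  simp only [hrep, hsplit, hfilter, hnofilter, hscan, beq_iff_eq]
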